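-- pv_equiv track=rewrite | github.com/essepuntato/comp-think | 2017-2018/exams/python/written-examination-2018-02-26_sect_2_w_count.py | calculate
-- ===== SOURCE A (Python) =====
-- def calculate(key, value, token_list):
--     l_len = len(token_list)
--     if l_len == 0:
--         return 0
--     else:
--         cur_token = token_list[0]
--
--         if key in cur_token:
--             result = value
--         else:
--             result = -1
--
--         return result + calculate(key, value, token_list[1:l_len])
-- ===== SOURCE B (Python) =====
-- def calculate(key, value, token_list):
--     m = sum(1 for tok in token_list if key in tok)
--     return value * m - (len(token_list) - m)
-- ===== Notes on version B (the rewrite author's own statement) =====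
-- stated objective: faster
-- what changed: Replaced A's head/tail recursion (slicing off one token per call and summing per-token +value/-1) with a single closed-form pass: count the matching tokens m and return value*m - (len - m).
import Mathlib
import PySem

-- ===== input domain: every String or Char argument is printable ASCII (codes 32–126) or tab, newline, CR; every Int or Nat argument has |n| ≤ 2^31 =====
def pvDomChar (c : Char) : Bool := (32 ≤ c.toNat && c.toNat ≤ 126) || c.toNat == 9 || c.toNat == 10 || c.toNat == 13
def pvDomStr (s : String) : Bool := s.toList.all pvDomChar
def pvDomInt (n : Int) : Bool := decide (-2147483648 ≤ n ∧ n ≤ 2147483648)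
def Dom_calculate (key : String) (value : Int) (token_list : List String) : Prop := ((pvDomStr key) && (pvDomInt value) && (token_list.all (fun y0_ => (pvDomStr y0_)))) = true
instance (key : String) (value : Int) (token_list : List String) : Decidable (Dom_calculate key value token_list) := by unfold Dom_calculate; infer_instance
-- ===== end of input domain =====

-- B replaces A's per-token recursion with a closed-form single pass (count matches, then value*m - (len - m)); objective: alternative.


-- ===== PORT A =====
-- Recursion on the token list: token_list[1:l_len] is exactly the tail in the non-empty branch.
def calculate (key : String) (value : Int) (token_list : List String) : Int :=
  match token_list with
  | [] => 0
  | cur_token :: rest =>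
      (if PySem.Str.isIn key cur_token then value else -1) + calculate key value rest

-- ===== PORT B =====
def calculate_alt (key : String) (value : Int) (token_list : List String) : Int :=
  let m : Int := (token_list.countP (fun tok => PySem.Str.isIn key tok) : Nat)
  value * m - ((token_list.length : Int) - m)

-- ===== PRECONDITION & SPEC =====
def Spec_calculate (key : String) (value : Int) (token_list : List String) (out : Int) : Prop := out = calculate_alt key value token_list
instance (key : String) (value : Int) (token_list : List String) (out : Int) : Decidable (Spec_calculate key value token_list out) := by unfold Spec_calculate; infer_instance

-- ===== CLAIM (what is proved, stated in full; the proofs are below) =====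
def Claim_equal_calculate : Prop := ∀ (key : String) (value : Int) (token_list : List String), Dom_calculate key value token_list → Spec_calculate key value token_list (calculate key value token_list)

-- ===== LEMMAS AND PROOFS =====
theorem calculate_eq_alt (key : String) (value : Int) (token_list : List String) :
    calculate key value token_list = calculate_alt key value token_list := by
  induction token_list with
  | nil => simp [calculate, calculate_alt]
  | cons h t ih =>
      simp only [calculate, calculate_alt, List.countP_cons, List.length_cons] at *
      by_cases hm : PySem.Str.isIn key h
      · simp only [hm, if_pos]
        rw [ih]; push_cast [hm]; ring
      · simp only [hm]
        rw [ih]; push_cast [hm]; ring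

-- ===== VERDICT (by name: the statement is the Claim_ definition above) =====
theorem calculate_spec : Claim_equal_calculate := by
  intro key value token_list _
  unfold Spec_calculate
  exact calculate_eq_alt key value token_list
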